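-- pv_equiv track=rewrite | github.com/tarunarty/SPARC-Primes | prime_patterns.py | spacing
-- ===== SOURCE A (Python) =====
-- def spacing(lis,y):
--     final = []
--     c = 0
--     for i in range(len(lis)):
--         if lis[i]==y:
--             final.append(c)
--             c = 0
--         else:
--             c+=1
--
--     return final
-- ===== SOURCE B (Python) =====
-- def spacing(lis, y):
--     idxs = [i for i, x in enumerate(lis) if x == y]
--     gaps = []
--     prev = -1
--     for idx in idxs:
--         gaps.append(idx - prev - 1)
--         prev = idx
--     return gaps
-- ===== Notes on version B (the rewrite author's own statement) =====
-- stated objective: alternative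
-- what changed: B first collects the indices of the occurrences of y and then turns consecutive index differences into gaps with a running prev=-1, instead of A's single pass that threads a counter reset at each match.
import Mathlib
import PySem

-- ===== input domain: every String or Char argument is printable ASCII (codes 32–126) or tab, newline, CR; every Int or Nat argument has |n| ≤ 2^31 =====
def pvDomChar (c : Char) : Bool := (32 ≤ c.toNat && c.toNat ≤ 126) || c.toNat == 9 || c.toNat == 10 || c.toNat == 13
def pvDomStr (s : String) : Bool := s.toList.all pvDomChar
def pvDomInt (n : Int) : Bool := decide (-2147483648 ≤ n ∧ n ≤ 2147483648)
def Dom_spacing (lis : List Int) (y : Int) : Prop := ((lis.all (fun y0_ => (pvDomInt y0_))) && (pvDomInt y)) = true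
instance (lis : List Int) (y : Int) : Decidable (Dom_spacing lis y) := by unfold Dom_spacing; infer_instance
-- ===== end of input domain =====

-- B collects the occurrence indices first and derives gaps from consecutive index differences; alternative decomposition, same O(n) cost.


-- ===== PORT A =====
-- for i in range(len(lis)): if lis[i]==y: final.append(c); c=0 else c+=1
-- (i is always in range, so pyGetD with default 0 is exact here)
def spacing (lis : List Int) (y : Int) : List Int :=
  ((PySem.List.pyRange 0 (lis.length : Int) 1).foldl
    (fun (st : List Int × Int) i =>
      if PySem.List.pyGetD lis i 0 = y then (st.1 ++ [st.2], 0) else (st.1, st.2 + 1))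
    ([], 0)).1

-- ===== PORT B =====
-- idxs = [i for i,x in enumerate(lis) if x==y]; then prev=-1 loop appending idx-prev-1
def spacing_alt (lis : List Int) (y : Int) : List Int :=
  let idxs := ((PySem.List.enumerate lis 0).filter (fun p => p.2 = y)).map Prod.fst
  (idxs.foldl (fun (st : List Int × Int) idx => (st.1 ++ [idx - st.2 - 1], idx)) ([], -1)).1

-- ===== PRECONDITION & SPEC =====
def Spec_spacing (lis : List Int) (y : Int) (out : List Int) : Prop := out = spacing_alt lis y
instance (lis : List Int) (y : Int) (out : List Int) : Decidable (Spec_spacing lis y out) := by unfold Spec_spacing; infer_instance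

-- ===== CLAIM (what is proved, stated in full; the proofs are below) =====
def Claim_equal_spacing : Prop := ∀ (lis : List Int) (y : Int), Dom_spacing lis y → Spec_spacing lis y (spacing lis y)

-- ===== LEMMAS AND PROOFS =====

-- A's fold over elements (counter c) agrees with B's fold over the matching indices
-- (running prev), under the invariant prev = k - c - 1 where k is the next index.
theorem spacing_core (y : Int) (l : List Int) : ∀ (k : Int) (acc : List Int) (c : Int),
    (l.foldl (fun (st : List Int × Int) x =>
        if x = y then (st.1 ++ [st.2], 0) else (st.1, st.2 + 1)) (acc, c)).1
    = ((((PySem.List.enumerate l k).filter (fun p => p.2 = y)).map Prod.fst).foldl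
        (fun (st : List Int × Int) idx => (st.1 ++ [idx - st.2 - 1], idx)) (acc, k - c - 1)).1 := by
  induction l with
  | nil => intro k acc c; simp
  | cons x xs ih =>
    intro k acc c
    by_cases h : x = y
    · simp only [List.foldl_cons, PySem.List.enumerate_cons, List.filter_cons, h,
        decide_true, if_true, List.map_cons]
      rw [ih (k + 1) (acc ++ [c]) 0, show k + 1 - 0 - 1 = k by ring,
        show k - (k - c - 1) - 1 = c by ring]
    · simp only [List.foldl_cons, PySem.List.enumerate_cons, List.filter_cons,
        decide_eq_true_eq, h, if_false]
      rw [ih (k + 1) acc (c + 1), show k + 1 - (c + 1) - 1 = k - c - 1 by ring]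

-- ===== VERDICT (by name: the statement is the Claim_ definition above) =====
theorem spacing_spec : Claim_equal_spacing := by
  intro lis y _
  unfold Spec_spacing spacing spacing_alt
  rw [PySem.List.foldl_pyRange_zero_pyGetD' lis 0
    (fun (st : List Int × Int) x => if x = y then (st.1 ++ [st.2], 0) else (st.1, st.2 + 1)) ([], 0)]
  simpa using spacing_core y lis 0 [] 0
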